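-- pv_equiv track=rewrite | github.com/Ishanbhatia98/AlgorithmicToolbox | week4/python/5_organizing_lottery.py | naivecheck
-- ===== SOURCE A (Python) =====
-- from collections import defaultdict as dd
--
-- def naivecheck(l, v):
--     d = dd(int)
--     for i in v:
--         for x, y in l:
--             if i in range(x, y+1):
--                 d[i] += 1
--             else:
--                 break
--     return d
-- ===== SOURCE B (Python) =====
-- from collections import defaultdict as dd
--
-- def _bisect_right(a, x):
--     # standard binary search (bisect.bisect_right), hand-written since A imports only collections
--     lo, hi = 0, len(a)
--     while lo < hi:
--         mid = (lo + hi) // 2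
--         if x < a[mid]:
--             hi = mid
--         else:
--             lo = mid + 1
--     return lo
--
-- def naivecheck(l, v):
--     # prefix-intersection arrays: lo[k] = max of first k+1 left ends, hi[k] = min of first k+1 right ends
--     lo, hi = [], []
--     a = b = None
--     for x, y in l:
--         a = x if a is None else max(a, x)
--         b = y if b is None else min(b, y)
--         lo.append(a)
--         hi.append(b)
--     neg = [-h for h in hi]  # nondecreasing, so bisect applies
--     d = dd(int)
--     for i in v:
--         k = min(_bisect_right(lo, i), _bisect_right(neg, -i))
--         if k:
--             d[i] += k
--     return d
-- ===== Notes on version B (the rewrite author's own statement) =====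
-- stated objective: alternative
-- what changed: Replaces the per-point rescan of the segment list by precomputed prefix-intersection arrays (running max of left ends, running min of right ends) with a binary search per query point; worst-case cost drops but on random inputs A's loop breaks early, so no measured speedup.
import Mathlib
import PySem

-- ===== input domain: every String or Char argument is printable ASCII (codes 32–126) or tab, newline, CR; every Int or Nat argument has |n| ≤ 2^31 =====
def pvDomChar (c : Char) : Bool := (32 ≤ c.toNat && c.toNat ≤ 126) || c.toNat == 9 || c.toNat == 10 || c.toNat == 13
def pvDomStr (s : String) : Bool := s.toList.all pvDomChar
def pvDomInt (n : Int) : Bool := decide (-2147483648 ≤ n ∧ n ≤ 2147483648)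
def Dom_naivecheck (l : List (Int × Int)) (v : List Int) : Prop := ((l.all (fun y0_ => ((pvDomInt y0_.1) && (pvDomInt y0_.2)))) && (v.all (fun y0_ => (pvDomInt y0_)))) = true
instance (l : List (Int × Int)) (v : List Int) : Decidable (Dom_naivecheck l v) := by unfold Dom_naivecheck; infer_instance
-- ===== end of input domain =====

-- B replaces A's per-point rescan of the segment list by prefix-intersection arrays (running
-- max of left ends / running min of right ends) plus a binary search per query point (objective:
-- alternative algorithm).

-- ===== PORT A =====
-- inner 'for x, y in l: … else: break' loop for one point i ('i in range(x, y+1)' ↔ x ≤ i ≤ y)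
def pvInnerA (i : Int) : List (Int × Int) → PySem.Dict Int Int → PySem.Dict Int Int
  | [], d => d
  | (x, y) :: t, d =>
      if x ≤ i ∧ i ≤ y then pvInnerA i t (d.modify i 0 (· + 1)) else d

def naivecheck (l : List (Int × Int)) (v : List Int) : List (Int × Int) :=
  (v.foldl (fun d i => pvInnerA i l d) PySem.Dict.empty).items

-- ===== PORT B =====
-- single pass building lo and hi (a and b are Python's None-initialised running accumulators)
def pvBuildLoHi : List (Int × Int) → Option Int → Option Int → List Int × List Int
  | [], _, _ => ([], [])
  | (x, y) :: t, a, b =>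
      let a' := match a with | none => x | some av => max av x
      let b' := match b with | none => y | some bv => min bv y
      let r := pvBuildLoHi t (some a') (some b')
      (a' :: r.1, b' :: r.2)

-- Source B's _bisect_right is the standard bisect_right binary-search loop, ported as PySem.List.bisectRight
def naivecheck_alt (l : List (Int × Int)) (v : List Int) : List (Int × Int) :=
  let lh := pvBuildLoHi l none none
  let lo := lh.1
  let neg := lh.2.map (fun h => -h)
  (v.foldl (fun (d : PySem.Dict Int Int) i =>
      let k : Nat := min (PySem.List.bisectRight lo i) (PySem.List.bisectRight neg (-i))
      if k ≠ 0 then d.modify i 0 (· + (k : Int)) else d) PySem.Dict.empty).items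

-- ===== PRECONDITION & SPEC =====
def Spec_naivecheck (l : List (Int × Int)) (v : List Int) (out : List (Int × Int)) : Prop := out = naivecheck_alt l v
instance (l : List (Int × Int)) (v : List Int) (out : List (Int × Int)) : Decidable (Spec_naivecheck l v out) := by unfold Spec_naivecheck; infer_instance

-- ===== CLAIM (what is proved, stated in full; the proofs are below) =====
def Claim_equal_naivecheck : Prop := ∀ (l : List (Int × Int)) (v : List Int), Dom_naivecheck l v → Spec_naivecheck l v (naivecheck l v)

-- ===== LEMMAS AND PROOFS =====

-- A's break-count for a point i: length of the matching prefix of l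
def pvCnt (i : Int) (l : List (Int × Int)) : Nat :=
  (l.takeWhile (fun xy => decide (xy.1 ≤ i ∧ i ≤ xy.2))).length

-- A's inner loop adds pvCnt i l at key i when it is nonzero, else leaves d untouched
lemma pvInnerA_eq (i : Int) (l : List (Int × Int)) (d : PySem.Dict Int Int) :
    pvInnerA i l d = if pvCnt i l ≠ 0 then d.modify i 0 (· + (pvCnt i l : Int)) else d := by
  induction l generalizing d with
  | nil => simp [pvInnerA, pvCnt]
  | cons hd t ih =>
    obtain ⟨x, y⟩ := hd
    by_cases hc : x ≤ i ∧ i ≤ y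
    · have hcnt : pvCnt i ((x, y) :: t) = pvCnt i t + 1 := by
        simp [pvCnt, List.takeWhile_cons, hc.1, hc.2]
      rw [show pvInnerA i ((x, y) :: t) d = pvInnerA i t (d.modify i 0 (· + 1)) by
            simp [pvInnerA, hc], ih]
      by_cases h0 : pvCnt i t = 0
      · simp [h0, hcnt]
      · have hcoll :
            ((d.modify i 0 (· + 1)).modify i 0 (· + (pvCnt i t : Int)))
              = d.modify i 0 (· + ((pvCnt i t + 1 : Nat) : Int)) := by
          simp [PySem.Dict.modify, PySem.Dict.getD_insert_self, PySem.Dict.insert_insert_self]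
          push_cast; ring_nf
        simp [h0, hcnt, hcoll]
    · have hcnt : pvCnt i ((x, y) :: t) = 0 := by
        simp only [pvCnt, List.takeWhile_cons]
        rw [decide_eq_false hc]
        simp
      simp [pvInnerA, hc, hcnt]

-- elements strictly inside the takeWhile prefix satisfy the predicate
lemma pvTW_pass (p : Int → Bool) (xs : List Int) (j : Nat) (hj : j < xs.length)
    (hjt : j < (xs.takeWhile p).length) : p xs[j] = true := by
  induction xs generalizing j with
  | nil => simp at hj
  | cons x t ih =>
    by_cases hp : p x
    · cases j with
      | zero => simpa [hp]
      | succ j' =>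
        have : j' < (t.takeWhile p).length := by
          simpa [List.takeWhile_cons, hp] using hjt
        simpa using ih j' (by simpa using hj) this
    · simp [List.takeWhile_cons, hp] at hjt

-- the element just after the takeWhile prefix fails the predicate
lemma pvTW_fail (p : Int → Bool) (xs : List Int)
    (h : (xs.takeWhile p).length < xs.length) :
    p (xs[(xs.takeWhile p).length]'h) = false := by
  induction xs with
  | nil => simp at h
  | cons x t ih =>
    by_cases hp : p x
    · have h' : (t.takeWhile p).length < t.length := by
        simpa [List.takeWhile_cons, hp] using h
      simpa [List.takeWhile_cons, hp] using ih h'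
    · simpa [List.takeWhile_cons, hp] using (by simpa using hp : p x = false)

-- bisect_right on a nondecreasing list is the length of the ≤-prefix
lemma pvBisect_eq_takeWhile (xs : List Int) (x : Int)
    (hs : List.Pairwise (· ≤ ·) xs) :
    PySem.List.bisectRight xs x = (xs.takeWhile (fun z => decide (z ≤ x))).length := by
  obtain ⟨hle, hlt, hgt⟩ := PySem.List.bisectRight_spec xs x hs
  set r := PySem.List.bisectRight xs x with hr
  set t := (xs.takeWhile (fun z => decide (z ≤ x))).length with ht
  have htlen : t ≤ xs.length := by
    simpa [ht] using (List.takeWhile_prefix (p := fun z => decide (z ≤ x)) (l := xs)).length_le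
  rcases Nat.lt_trichotomy r t with hcase | hcase | hcase
  · exfalso
    have hjlen : r < xs.length := lt_of_lt_of_le hcase htlen
    have h1 : x < xs[r] := hgt r hjlen (le_refl r)
    have h2 : decide (xs[r] ≤ x) = true := pvTW_pass _ xs r hjlen hcase
    have := of_decide_eq_true h2
    omega
  · exact hcase
  · exfalso
    have hjlen : t < xs.length := lt_of_lt_of_le hcase hle
    have h1 : xs[t] ≤ x := hlt t hjlen hcase
    have h2 : decide (xs[t] ≤ x) = false := pvTW_fail _ xs hjlen
    have := of_decide_eq_false h2
    omega

-- lo is nondecreasing and bounded below by a; hi is nonincreasing and bounded above by b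
lemma pvLoHi_bounds (t : List (Int × Int)) : ∀ (a b : Int),
    ((pvBuildLoHi t (some a) (some b)).1.Pairwise (· ≤ ·)) ∧
    ((pvBuildLoHi t (some a) (some b)).2.Pairwise (fun u w => w ≤ u)) ∧
    (∀ z ∈ (pvBuildLoHi t (some a) (some b)).1, a ≤ z) ∧
    (∀ z ∈ (pvBuildLoHi t (some a) (some b)).2, z ≤ b) := by
  induction t with
  | nil => intro a b; simp [pvBuildLoHi]
  | cons hd r ih =>
    intro a b
    obtain ⟨x, y⟩ := hd
    obtain ⟨hp1, hp2, hb1, hb2⟩ := ih (max a x) (min b y)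
    refine ⟨?_, ?_, ?_, ?_⟩ <;> simp only [pvBuildLoHi]
    · exact List.Pairwise.cons (fun z hz => hb1 z hz) hp1
    · exact List.Pairwise.cons (fun z hz => hb2 z hz) hp2
    · intro z hz
      rcases List.mem_cons.mp hz with h | h
      · subst h; exact le_max_left a x
      · exact le_trans (le_max_left a x) (hb1 z h)
    · intro z hz
      rcases List.mem_cons.mp hz with h | h
      · subst h; exact min_le_left b y
      · exact le_trans (hb2 z h) (min_le_left b y)

lemma pvLo_sorted (l : List (Int × Int)) :
    ((pvBuildLoHi l none none).1.Pairwise (· ≤ ·)) ∧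
    ((pvBuildLoHi l none none).2.Pairwise (fun u w => w ≤ u)) := by
  cases l with
  | nil => simp [pvBuildLoHi]
  | cons hd t =>
    obtain ⟨x, y⟩ := hd
    obtain ⟨hp1, hp2, hb1, hb2⟩ := pvLoHi_bounds t x y
    constructor <;> simp only [pvBuildLoHi]
    · exact List.Pairwise.cons (fun z hz => hb1 z hz) hp1
    · exact List.Pairwise.cons (fun z hz => hb2 z hz) hp2

-- the two prefix lengths on the running-intersection arrays recover A's break-count
lemma pvG (t : List (Int × Int)) : ∀ (i a b : Int), a ≤ i → i ≤ b →
    min (((pvBuildLoHi t (some a) (some b)).1.takeWhile (fun z => decide (z ≤ i))).length)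
        (((pvBuildLoHi t (some a) (some b)).2.takeWhile (fun z => decide (i ≤ z))).length)
    = pvCnt i t := by
  induction t with
  | nil => intro i a b _ _; simp [pvBuildLoHi, pvCnt]
  | cons hd r ih =>
    intro i a b ha hb
    obtain ⟨x, y⟩ := hd
    by_cases hc : x ≤ i ∧ i ≤ y
    · have ha' : max a x ≤ i := max_le ha hc.1
      have hb' : i ≤ min b y := le_min hb hc.2
      have hcnt : pvCnt i ((x, y) :: r) = pvCnt i r + 1 := by
        simp [pvCnt, List.takeWhile_cons, hc.1, hc.2]
      simp only [pvBuildLoHi, List.takeWhile_cons, decide_eq_true ha', decide_eq_true hb', if_true,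
        List.length_cons, hcnt]
      rw [Nat.succ_min_succ]
      exact congrArg Nat.succ (ih i (max a x) (min b y) ha' hb')
    · have hcnt : pvCnt i ((x, y) :: r) = 0 := by
        simp only [pvCnt, List.takeWhile_cons]
        rw [decide_eq_false hc]
        simp
      rw [hcnt]
      rcases not_and_or.mp hc with h | h
      · have hmx : ¬ (max a x ≤ i) := fun hle => h (le_trans (le_max_right a x) hle)
        simp [pvBuildLoHi, List.takeWhile_cons, hmx]
      · have hmy : ¬ (i ≤ min b y) := fun hle => h (le_trans hle (min_le_right b y))
        simp [pvBuildLoHi, List.takeWhile_cons, hmy]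

-- B's per-point binary-search count equals A's break-count
lemma pvK_eq (l : List (Int × Int)) (i : Int) :
    min (PySem.List.bisectRight (pvBuildLoHi l none none).1 i)
        (PySem.List.bisectRight ((pvBuildLoHi l none none).2.map (fun h => -h)) (-i))
    = pvCnt i l := by
  obtain ⟨hlo, hhi⟩ := pvLo_sorted l
  have hneg : List.Pairwise (· ≤ ·) ((pvBuildLoHi l none none).2.map (fun h => -h)) := by
    rw [List.pairwise_map]
    exact hhi.imp (fun h => by omega)
  rw [pvBisect_eq_takeWhile _ _ hlo, pvBisect_eq_takeWhile _ _ hneg]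
  have hmap :
      (((pvBuildLoHi l none none).2.map (fun h => -h)).takeWhile (fun z => decide (z ≤ -i))).length
        = (((pvBuildLoHi l none none).2).takeWhile (fun z => decide (i ≤ z))).length := by
    rw [List.takeWhile_map, List.length_map]
    have hpred : ((fun z => decide (z ≤ -i)) ∘ fun h : Int => -h) = (fun z : Int => decide (i ≤ z)) := by
      funext z
      simp only [Function.comp, decide_eq_decide]
      omega
    rw [hpred]
  rw [hmap]
  cases l with
  | nil => simp [pvBuildLoHi, pvCnt]
  | cons hd t =>
    obtain ⟨x, y⟩ := hd
    by_cases hc : x ≤ i ∧ i ≤ y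
    · have hcnt : pvCnt i ((x, y) :: t) = pvCnt i t + 1 := by
        simp [pvCnt, List.takeWhile_cons, hc.1, hc.2]
      simp only [pvBuildLoHi, List.takeWhile_cons, decide_eq_true hc.1, decide_eq_true hc.2, if_true,
        List.length_cons, hcnt]
      rw [Nat.succ_min_succ]
      exact congrArg Nat.succ (pvG t i x y hc.1 hc.2)
    · have hcnt : pvCnt i ((x, y) :: t) = 0 := by
        simp only [pvCnt, List.takeWhile_cons]
        rw [decide_eq_false hc]
        simp
      rw [hcnt]
      rcases not_and_or.mp hc with h | h
      · simp [pvBuildLoHi, List.takeWhile_cons, h]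
      · simp [pvBuildLoHi, List.takeWhile_cons, h]

-- ===== VERDICT (by name: the statement is the Claim_ definition above) =====
theorem naivecheck_spec : Claim_equal_naivecheck := by
  intro l v _
  show naivecheck l v = naivecheck_alt l v
  unfold naivecheck naivecheck_alt
  apply congrArg PySem.Dict.items
  apply PySem.List.foldl_congr_mem
  intro d i _
  rw [pvInnerA_eq, ← pvK_eq l i]
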